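-- pv_equiv track=rewrite | github.com/vanjiii/playground | hackbg/programming-51/Programming0/week3/large_and_small.py | large_and_small
-- ===== SOURCE A (Python) =====
-- def large_and_small(number):
-- 	number_arr = []
-- 	result = []
-- 	big_number = ""
-- 	small_number = ""
--
-- 	while number != 0:
-- 		digit = number % 10
-- 		number = number // 10
-- 		number_arr += [digit]
--
-- 	number_arr.sort()
-- 	for num in number_arr:
-- 		big_number += str(num)
--
-- 	number_arr.reverse()
-- 	for num in number_arr:
-- 		small_number += str(num)
--
-- 	result = result + [int(big_number)] + [int(small_number)]
--
-- 	return result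
-- ===== SOURCE B (Python) =====
-- def large_and_small(number):
--     counts = [0] * 10
--     while number != 0:
--         counts[number % 10] += 1
--         number = number // 10
--
--     big_number = ""
--     small_number = ""
--     for d in range(10):
--         big_number += str(d) * counts[d]
--     for d in range(9, -1, -1):
--         small_number += str(d) * counts[d]
--
--     return [int(big_number), int(small_number)]
-- ===== Notes on version B (the rewrite author's own statement) =====
-- stated objective: alternative
-- what changed: B replaces A's collect-digits-then-sort()-then-reverse() pipeline with a ten-bucket digit-frequency table filled in the peeling loop, then builds the ascending string by iterating digit values zero through nine and the descending string in the opposite order, repeating each digit character by its count.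
-- outside the precondition, e.g. on large_and_small(0): A raises ValueError, B raises ValueError
import Mathlib
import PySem

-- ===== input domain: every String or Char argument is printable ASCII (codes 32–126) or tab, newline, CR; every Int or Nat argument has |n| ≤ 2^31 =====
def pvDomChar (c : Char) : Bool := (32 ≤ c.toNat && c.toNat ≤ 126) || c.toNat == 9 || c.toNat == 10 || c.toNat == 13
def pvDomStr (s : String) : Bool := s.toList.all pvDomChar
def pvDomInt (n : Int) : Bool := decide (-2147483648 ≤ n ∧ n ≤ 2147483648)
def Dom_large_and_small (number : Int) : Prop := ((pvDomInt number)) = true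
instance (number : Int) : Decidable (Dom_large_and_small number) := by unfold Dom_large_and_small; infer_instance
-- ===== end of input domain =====

-- B builds the two digit strings from a 10-bucket digit-frequency table instead of
-- sorting the collected digit list (objective: alternative decomposition).

-- ===== PORT A =====
-- `while number != 0:` digit-peeling loop of A; the `0 < n` guard totalizes the
-- recursion (Python diverges for negative numbers; Pre_ restricts to 0 < number,
-- where the guard coincides with `number != 0`).
def pvDigitsA (n : Int) (acc : List Int) : List Int :=
  if 0 < n then
    pvDigitsA (PySem.Int.floordiv n 10) (acc ++ [PySem.Int.mod n 10])
  else acc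
termination_by n.toNat
decreasing_by
  rename_i h
  rw [PySem.Int.floordiv_eq_ediv_of_pos (by omega : (0:Int) < 10)]
  omega

def large_and_small (number : Int) : List Int :=
  let number_arr := pvDigitsA number []
  let sortedArr := PySem.List.sorted number_arr (fun x => x) false
  let big_number := sortedArr.foldl (fun s num => s ++ PySem.Int.toStr num) ""
  let small_number := sortedArr.reverse.foldl (fun s num => s ++ PySem.Int.toStr num) ""
  -- int("") raises ValueError (only reachable at number = 0, outside Pre_); `.getD 0` totalizes
  [(PySem.Int.ofStr? big_number).getD 0, (PySem.Int.ofStr? small_number).getD 0]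

-- ===== PORT B =====
-- Python 'str(d) * k' (string repetition; empty for k ≤ 0)
def pvStrMul (s : String) (k : Int) : String :=
  (List.replicate k.toNat s).foldl (fun a b => a ++ b) ""

-- B's counting while-loop (same totalizing guard as A's loop)
def pvCountsB (n : Int) (counts : List Int) : List Int :=
  if 0 < n then
    pvCountsB (PySem.Int.floordiv n 10)
      (counts.set (PySem.Int.mod n 10).toNat
        (counts.getD (PySem.Int.mod n 10).toNat 0 + 1))
  else counts
termination_by n.toNat
decreasing_by
  rename_i h
  rw [PySem.Int.floordiv_eq_ediv_of_pos (by omega : (0:Int) < 10)]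
  omega

def large_and_small_alt (number : Int) : List Int :=
  let counts := pvCountsB number (List.replicate 10 0)
  let big_number := (PySem.List.pyRange 0 10 1).foldl
    (fun s d => s ++ pvStrMul (PySem.Int.toStr d) (counts.getD d.toNat 0)) ""
  let small_number := (PySem.List.pyRange 9 (-1) (-1)).foldl
    (fun s d => s ++ pvStrMul (PySem.Int.toStr d) (counts.getD d.toNat 0)) ""
  [(PySem.Int.ofStr? big_number).getD 0, (PySem.Int.ofStr? small_number).getD 0]

-- ===== PRECONDITION & SPEC =====
-- A raises ValueError at number = 0 (int("")) and loops forever for number < 0,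
-- so Pre_ admits exactly the positive inputs.
def Pre_large_and_small (number : Int) : Prop := 0 < number
instance (number : Int) : Decidable (Pre_large_and_small number) := by
  unfold Pre_large_and_small; infer_instance

def pvWitness_large_and_small : Int := 1002

def Spec_large_and_small (number : Int) (out : List Int) : Prop := out = large_and_small_alt number
instance (number : Int) (out : List Int) : Decidable (Spec_large_and_small number out) := by
  unfold Spec_large_and_small; infer_instance

-- ===== CLAIM (what is proved, stated in full; the proofs are below) =====
def Claim_equal_large_and_small : Prop :=
  ∀ (number : Int), Dom_large_and_small number → Pre_large_and_small number →
    Spec_large_and_small number (large_and_small number)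

-- ===== LEMMAS AND PROOFS =====

theorem pvStep_lt (n : Int) (h : 0 < n) : (PySem.Int.floordiv n 10).toNat < n.toNat := by
  rw [PySem.Int.floordiv_eq_ediv_of_pos (by omega : (0:Int) < 10)]; omega

theorem pvMod_bounds (n : Int) (_h : 0 < n) :
    0 ≤ PySem.Int.mod n 10 ∧ PySem.Int.mod n 10 < 10 := by
  rw [PySem.Int.mod_eq_emod_of_pos (by omega : (0:Int) < 10)]; omega

-- A's loop with accumulator prepends the accumulated digits
theorem pvDigitsA_acc (n : Int) (acc : List Int) :
    pvDigitsA n acc = acc ++ pvDigitsA n [] := by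
  have H : ∀ (k : Nat) (n : Int), n.toNat ≤ k → ∀ (acc : List Int),
      pvDigitsA n acc = acc ++ pvDigitsA n [] := by
    intro k
    induction k with
    | zero =>
      intro n hn acc
      have h : ¬ 0 < n := by omega
      rw [pvDigitsA, if_neg h, pvDigitsA, if_neg h]; simp
    | succ k ih =>
      intro n hn acc
      by_cases h : 0 < n
      · have hb : (PySem.Int.floordiv n 10).toNat ≤ k := by
          have := pvStep_lt n h; omega
        conv_lhs => rw [pvDigitsA, if_pos h]
        conv_rhs => rw [pvDigitsA, if_pos h]
        rw [ih _ hb, ih _ hb ([] ++ [PySem.Int.mod n 10])]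
        simp
      · rw [pvDigitsA, if_neg h, pvDigitsA, if_neg h]; simp
  exact H n.toNat n le_rfl acc

-- the head step of A's loop
theorem pvDigitsA_pos (n : Int) (h : 0 < n) :
    pvDigitsA n [] = PySem.Int.mod n 10 :: pvDigitsA (PySem.Int.floordiv n 10) [] := by
  conv_lhs => rw [pvDigitsA, if_pos h]
  rw [pvDigitsA_acc]; simp

theorem pvDigitsA_bounds (n : Int) : ∀ x ∈ pvDigitsA n [], 0 ≤ x ∧ x < 10 := by
  have H : ∀ (k : Nat) (n : Int), n.toNat ≤ k → ∀ x ∈ pvDigitsA n [], 0 ≤ x ∧ x < 10 := by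
    intro k
    induction k with
    | zero =>
      intro n hn x hx
      have h : ¬ 0 < n := by omega
      rw [pvDigitsA, if_neg h] at hx; simp at hx
    | succ k ih =>
      intro n hn x hx
      by_cases h : 0 < n
      · rw [pvDigitsA_pos n h] at hx
        rcases List.mem_cons.mp hx with hx | hx
        · subst hx; exact pvMod_bounds n h
        · exact ih _ (by have := pvStep_lt n h; omega) x hx
      · rw [pvDigitsA, if_neg h] at hx; simp at hx
  exact H n.toNat n le_rfl

-- B's counting loop computes the digit frequencies of A's digit list
theorem pvCountsB_getD (n : Int) (counts : List Int) (hlen : counts.length = 10)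
    (d : Nat) (hd : d < 10) :
    (pvCountsB n counts).getD d 0
      = counts.getD d 0 + ((pvDigitsA n []).count (d : Int) : Int) := by
  have H : ∀ (k : Nat) (n : Int), n.toNat ≤ k → ∀ (counts : List Int),
      counts.length = 10 → ∀ (d : Nat), d < 10 →
      (pvCountsB n counts).getD d 0
        = counts.getD d 0 + ((pvDigitsA n []).count (d : Int) : Int) := by
    intro k
    induction k with
    | zero =>
      intro n hn counts hlen d hd
      have h : ¬ 0 < n := by omega
      rw [pvCountsB, if_neg h, pvDigitsA, if_neg h]
      simp
    | succ k ih =>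
      intro n hn counts hlen d hd
      by_cases h : 0 < n
      · have hm := pvMod_bounds n h
        obtain ⟨m, hmdef⟩ : ∃ m, PySem.Int.mod n 10 = m := ⟨_, rfl⟩
        rw [hmdef] at hm
        rw [pvCountsB, if_pos h, hmdef,
          ih _ (by have := pvStep_lt n h; omega) _ (by simp [hlen]) d hd,
          pvDigitsA_pos n h, hmdef, List.count_cons,
          List.getD_eq_getElem?_getD, List.getElem?_set, hlen]
        rw [show counts.getD d 0 = counts[d]?.getD 0 from List.getD_eq_getElem?_getD]
        by_cases hdm : m.toNat = d
        · have hmd : m = (d : Int) := by omega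
          rw [if_pos hdm, if_pos (show m.toNat < 10 by omega), hdm]
          simp [hmd, ← List.getD_eq_getElem?_getD]
          ring
        · have hid : (m == (d : Int)) = false := by simp; omega
          rw [if_neg hdm]
          simp [hid]
      · rw [pvCountsB, if_neg h, pvDigitsA, if_neg h]
        simp
  exact H n.toNat n le_rfl counts hlen d hd

-- sorted digit list = frequency blocks in increasing digit order
theorem pvSorted_canon (xs : List Int) (hb : ∀ x ∈ xs, 0 ≤ x ∧ x < 10) :
    PySem.List.sorted xs (fun x => x) false
      = ([0,1,2,3,4,5,6,7,8,9] : List Int).flatMap (fun d => List.replicate (xs.count d) d) := by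
  apply PySem.List.sorted_id_eq_of_perm_of_pairwise
  · apply List.perm_iff_count.mpr
    intro a
    by_cases ha : 0 ≤ a ∧ a < 10
    · have h10 : a = 0 ∨ a = 1 ∨ a = 2 ∨ a = 3 ∨ a = 4 ∨ a = 5 ∨ a = 6 ∨ a = 7 ∨ a = 8 ∨ a = 9 := by omega
      rcases h10 with h|h|h|h|h|h|h|h|h|h <;> subst h <;>
        simp [List.count_append, List.count_replicate]
    · have hnot : a ∉ xs := fun hx => ha ⟨(hb a hx).1, (hb a hx).2⟩
      have h2 : a ∉ ([0,1,2,3,4,5,6,7,8,9] : List Int).flatMap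
          (fun d => List.replicate (xs.count d) d) := by
        intro h
        simp [List.mem_replicate] at h
        omega
      rw [List.count_eq_zero_of_not_mem hnot, List.count_eq_zero_of_not_mem h2]
  · simp [List.pairwise_append, List.pairwise_replicate, List.mem_replicate, List.mem_append]
    and_intros <;> (intros; omega)

-- pulling the accumulator out of a string-building foldl
theorem pvFoldl_out {a : Type} (g : a → String) (L : List a) (acc : String) :
    L.foldl (fun s x => s ++ g x) acc = acc ++ L.foldl (fun s x => s ++ g x) "" := by
  induction L generalizing acc with
  | nil => simp
  | cons y L ih =>
    rw [List.foldl_cons, List.foldl_cons, ih, ih ("" ++ g y)]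
    simp [String.append_assoc]

-- one frequency block folds to Python's  str(d) * cnt
theorem pvFoldl_replicate (d : Int) (c : Nat) :
    (List.replicate c d).foldl (fun s x => s ++ PySem.Int.toStr x) ""
      = pvStrMul (PySem.Int.toStr d) (c : Int) := by
  unfold pvStrMul
  rw [Int.toNat_natCast]
  induction c with
  | zero => simp
  | succ c ih =>
    rw [List.replicate_succ' , List.replicate_succ' , List.foldl_append, List.foldl_append, ih]
    simp [List.foldl]

-- folding digit strings over frequency blocks = folding repeated strings over the digits
theorem pvFoldFlat (cnt : Int → Nat) (ds : List Int) :
    (ds.flatMap (fun d => List.replicate (cnt d) d)).foldl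
        (fun s x => s ++ PySem.Int.toStr x) ""
      = ds.foldl (fun s d => s ++ pvStrMul (PySem.Int.toStr d) ((cnt d : Int))) "" := by
  induction ds with
  | nil => simp
  | cons d ds ih =>
    rw [List.flatMap_cons, List.foldl_append, List.foldl_cons,
      pvFoldl_out _ _ (List.foldl _ "" _),
      pvFoldl_out _ ds ("" ++ pvStrMul (PySem.Int.toStr d) ((cnt d : Int))),
      ih, pvFoldl_replicate]
    simp

-- the digit-frequency table after B's loop, at indices 0..9
theorem pvCounts_final (n : Int) (d : Nat) (hd : d < 10) :
    (pvCountsB n (List.replicate 10 0)).getD d 0 = ((pvDigitsA n []).count (d : Int) : Int) := by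
  rw [pvCountsB_getD n _ (by simp) d hd]
  have : (List.replicate 10 (0 : Int)).getD d 0 = 0 := by
    rw [List.getD_eq_getElem?_getD, List.getElem?_replicate]
    simp [hd]
  rw [this]; ring

-- ===== VERDICT (by name: the statement is the Claim_ definition above) =====
theorem large_and_small_spec : Claim_equal_large_and_small := by
  intro number _ hpre
  unfold Spec_large_and_small
  simp only [large_and_small, large_and_small_alt]
  have hpre' : (0:Int) < number := hpre
  have hb := pvDigitsA_bounds number
  set xs := pvDigitsA number [] with hxs
  have hcanon := pvSorted_canon xs hb
  have hrange : PySem.List.pyRange 0 10 1 = ([0,1,2,3,4,5,6,7,8,9] : List Int) := by decide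
  have hrange' : PySem.List.pyRange 9 (-1) (-1) = ([9,8,7,6,5,4,3,2,1,0] : List Int) := by decide
  have hcnt : ∀ d ∈ ([0,1,2,3,4,5,6,7,8,9] : List Int),
      (pvCountsB number (List.replicate 10 0)).getD d.toNat 0 = ((xs.count d : Nat) : Int) := by
    intro d hd
    simp at hd
    rcases hd with h|h|h|h|h|h|h|h|h|h <;> subst h <;>
      exact pvCounts_final number _ (by omega)
  have hbig :
      (PySem.List.sorted xs (fun x => x) false).foldl (fun s num => s ++ PySem.Int.toStr num) ""
        = (PySem.List.pyRange 0 10 1).foldl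
            (fun s d => s ++ pvStrMul (PySem.Int.toStr d)
              ((pvCountsB number (List.replicate 10 0)).getD d.toNat 0)) "" := by
    rw [hcanon, pvFoldFlat (fun d => xs.count d), hrange]
    apply PySem.List.foldl_congr_mem
    intro acc x hx
    rw [hcnt x hx]
  have hsmall :
      (PySem.List.sorted xs (fun x => x) false).reverse.foldl (fun s num => s ++ PySem.Int.toStr num) ""
        = (PySem.List.pyRange 9 (-1) (-1)).foldl
            (fun s d => s ++ pvStrMul (PySem.Int.toStr d)
              ((pvCountsB number (List.replicate 10 0)).getD d.toNat 0)) "" := by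
    have hlit : (([0,1,2,3,4,5,6,7,8,9] : List Int)).reverse = ([9,8,7,6,5,4,3,2,1,0] : List Int) := by
      decide
    rw [hcanon, List.reverse_flatMap, hlit]
    simp only [Function.comp_def, List.reverse_replicate]
    rw [pvFoldFlat (fun d => xs.count d), hrange']
    apply PySem.List.foldl_congr_mem
    intro acc x hx
    have hx' : x ∈ ([0,1,2,3,4,5,6,7,8,9] : List Int) := by simp at hx ⊢; omega
    rw [hcnt x hx']
  rw [hbig, hsmall]
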